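-- pv_equiv track=rewrite | github.com/ago-char/cloneme | new.py | leet_to_normal
-- ===== SOURCE A (Python) =====
-- def leet_to_normal(leet_text, leet_dict):
--     if not leet_text:
--         return [""]
--
--     possibilities = []
--     for key in leet_dict:
--         if leet_text.startswith(key):
--             remaining_text = leet_text[len(key):]
--             for result in leet_to_normal(remaining_text, leet_dict):
--                 possibilities.append(leet_dict[key] + result)
--
--     if not possibilities:
--         return [leet_text[0] + result for result in leet_to_normal(leet_text[1:], leet_dict)]
--
--     return possibilities
-- ===== SOURCE B (Python) =====
-- def leet_to_normal(leet_text, leet_dict):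
--     # Two-phase DP: first precompute, for every position, the (length, replacement)
--     # options (matching keys, or the literal character when nothing matches); then
--     # compose decodings right-to-left from those options, each suffix's list built once.
--     n = len(leet_text)
--     items = list(leet_dict.items())
--     opts = []
--     for i in range(n):
--         o = [(len(k), v) for k, v in items if leet_text.startswith(k, i)]
--         opts.append(o if o else [(1, leet_text[i])])
--     results = [None] * n + [[""]]
--     for i in range(n - 1, -1, -1):
--         results[i] = [v + r for (l, v) in opts[i] for r in results[i + l]]
--     return results[0]
-- ===== Notes on version B (the rewrite author's own statement) =====
-- stated objective: alternative
-- what changed: Replaced A's top-down recursion by a two-phase pass: first precompute per-position (length, replacement) options including the literal-character fallback, then compose the decoding lists right-to-left from that table, so each suffix's decoding list is built exactly once.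
import Mathlib
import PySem

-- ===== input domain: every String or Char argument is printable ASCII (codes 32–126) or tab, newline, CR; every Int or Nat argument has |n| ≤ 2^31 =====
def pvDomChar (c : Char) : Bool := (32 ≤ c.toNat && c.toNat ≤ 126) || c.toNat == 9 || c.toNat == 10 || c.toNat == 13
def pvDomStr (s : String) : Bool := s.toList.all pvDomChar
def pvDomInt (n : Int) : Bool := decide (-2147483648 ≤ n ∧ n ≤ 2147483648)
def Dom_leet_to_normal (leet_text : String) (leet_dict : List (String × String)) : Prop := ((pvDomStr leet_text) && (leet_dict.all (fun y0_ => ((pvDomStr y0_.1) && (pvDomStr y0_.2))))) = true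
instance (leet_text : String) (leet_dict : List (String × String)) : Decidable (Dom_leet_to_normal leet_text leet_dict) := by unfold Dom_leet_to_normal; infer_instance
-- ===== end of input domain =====

-- B replaces A's top-down recursion by a two-phase pass (per-position options, then a
-- right-to-left composition over a table); same value on Pre_.

-- ===== PORT A =====
-- Literal port of A's recursion, over the character list (dict → PySem.Dict, iterated as its
-- items). The fuel only makes the recursion total: length + 1 always suffices on Pre_, where
-- every key is nonempty so each recursive call drops at least one character.
def pvAux (its : List (String × String)) : Nat → List Char → List (List Char)
  | 0, _ => []
  | fuel + 1, cs =>
    match cs with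
    | [] => [[]]
    | c :: rest =>
      let possibilities := its.foldl (fun acc kv =>
        if kv.1.toList.isPrefixOf (c :: rest) then
          acc ++ (pvAux its fuel ((c :: rest).drop kv.1.toList.length)).map
                   (fun r => kv.2.toList ++ r)
        else acc) []
      if possibilities = [] then (pvAux its fuel rest).map (fun r => c :: r)
      else possibilities

def leet_to_normal (leet_text : String) (leet_dict : List (String × String)) : List String :=
  (pvAux (PySem.Dict.ofList leet_dict).items (leet_text.toList.length + 1)
     leet_text.toList).map (fun l => String.ofList l)

-- ===== PORT B =====
-- Phase 1 of Source B: options per position (the front-to-back loop over i becomes structural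
-- recursion on the character list; the comprehension over items becomes filterMap).
def pvOpts (its : List (String × String)) : List Char → List (List (Nat × List Char))
  | [] => []
  | c :: rest =>
    (let o := its.filterMap (fun kv =>
        if kv.1.toList.isPrefixOf (c :: rest) then some (kv.1.toList.length, kv.2.toList)
        else none)
     if o = [] then [(1, [c])] else o) :: pvOpts its rest

-- Phase 2 of Source B: right-to-left composition; the returned list's entry j holds Source B's
-- results[i+j] (results of the j-th remaining suffix), so results[i+l] is entry (l-1).
def pvCompose : List (List (Nat × List Char)) → List (List (List Char))
  | [] => [[[]]]
  | o :: rest =>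
    let tl := pvCompose rest
    (o.flatMap (fun lv => (tl.getD (lv.1 - 1) []).map (fun r => lv.2 ++ r))) :: tl

def leet_to_normal_alt (leet_text : String) (leet_dict : List (String × String)) : List String :=
  ((pvCompose (pvOpts (PySem.Dict.ofList leet_dict).items leet_text.toList)).headD [[]]).map
    (fun l => String.ofList l)

-- ===== PRECONDITION & SPEC =====
-- Pre_ excludes only the dicts that contain the empty-string key together with a nonempty
-- text: there A recurses forever (RecursionError), so A returns on no excluded input.
def Pre_leet_to_normal (leet_text : String) (leet_dict : List (String × String)) : Prop :=
  leet_text = "" ∨ ∀ p ∈ leet_dict, p.1 ≠ ""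
instance (leet_text : String) (leet_dict : List (String × String)) : Decidable (Pre_leet_to_normal leet_text leet_dict) := by unfold Pre_leet_to_normal; infer_instance

def pvWitness_leet_to_normal : String × (List (String × String)) :=
  ("1337", [("1", "l"), ("3", "e"), ("7", "t"), ("13", "b")])

def Spec_leet_to_normal (leet_text : String) (leet_dict : List (String × String)) (out : List String) : Prop := out = leet_to_normal_alt leet_text leet_dict
instance (leet_text : String) (leet_dict : List (String × String)) (out : List String) : Decidable (Spec_leet_to_normal leet_text leet_dict out) := by unfold Spec_leet_to_normal; infer_instance

-- ===== CLAIM (what is proved, stated in full; the proofs are below) =====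
def Claim_equal_leet_to_normal : Prop := ∀ (leet_text : String) (leet_dict : List (String × String)), Dom_leet_to_normal leet_text leet_dict → Pre_leet_to_normal leet_text leet_dict → Spec_leet_to_normal leet_text leet_dict (leet_to_normal leet_text leet_dict)

-- ===== LEMMAS AND PROOFS =====

-- Definitional unfolding equation for pvAux (cited by the proofs below).
theorem pvAux_succ_cons (its : List (String × String)) (g : Nat) (c : Char) (rest : List Char) :
    pvAux its (g + 1) (c :: rest) =
      (if (its.foldl (fun acc kv =>
            if kv.1.toList.isPrefixOf (c :: rest) then
              acc ++ (pvAux its g ((c :: rest).drop kv.1.toList.length)).map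
                       (fun r => kv.2.toList ++ r)
            else acc) []) = []
       then (pvAux its g rest).map (fun r => c :: r)
       else (its.foldl (fun acc kv =>
            if kv.1.toList.isPrefixOf (c :: rest) then
              acc ++ (pvAux its g ((c :: rest).drop kv.1.toList.length)).map
                       (fun r => kv.2.toList ++ r)
            else acc) [])) := rfl

-- With no empty key, pvAux is fuel-insensitive once the fuel exceeds the text length.
theorem pvAux_fuel (its : List (String × String))
    (hk : ∀ kv ∈ its, kv.1.toList ≠ ([] : List Char)) :
    ∀ (n : Nat) (cs : List Char), cs.length = n → ∀ (f₁ f₂ : Nat), n < f₁ → n < f₂ →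
      pvAux its f₁ cs = pvAux its f₂ cs := by
  intro n
  induction n using Nat.strong_induction_on with
  | _ n ih =>
    intro cs hlen f₁ f₂ h₁ h₂
    obtain ⟨g₁, rfl⟩ : ∃ g, f₁ = g + 1 := ⟨f₁ - 1, by omega⟩
    obtain ⟨g₂, rfl⟩ : ∃ g, f₂ = g + 1 := ⟨f₂ - 1, by omega⟩
    cases cs with
    | nil => simp [pvAux]
    | cons c rest =>
      have hn : rest.length + 1 = n := by simpa using hlen
      rw [pvAux_succ_cons, pvAux_succ_cons]
      have hfold : ∀ g : Nat, n ≤ g →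
          (its.foldl (fun acc kv =>
            if kv.1.toList.isPrefixOf (c :: rest) then
              acc ++ (pvAux its g ((c :: rest).drop kv.1.toList.length)).map
                       (fun r => kv.2.toList ++ r)
            else acc) []) =
          (its.foldl (fun acc kv =>
            if kv.1.toList.isPrefixOf (c :: rest) then
              acc ++ (pvAux its g₂ ((c :: rest).drop kv.1.toList.length)).map
                       (fun r => kv.2.toList ++ r)
            else acc) []) := by
        intro g hg
        apply PySem.List.foldl_congr_mem
        intro acc kv hkv
        by_cases hp : kv.1.toList.isPrefixOf (c :: rest) = true
        · have hpre := List.isPrefixOf_iff_prefix.mp hp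
          have hle : kv.1.toList.length ≤ rest.length + 1 := by
            simpa using hpre.length_le
          have hpos : 1 ≤ kv.1.toList.length :=
            List.length_pos_of_ne_nil (hk kv hkv)
          have hdrop : ((c :: rest).drop kv.1.toList.length).length
              = rest.length + 1 - kv.1.toList.length := by
            simp [List.length_drop]
          have := ih (((c :: rest).drop kv.1.toList.length).length)
            (by omega) _ rfl g g₂ (by omega) (by omega)
          simp only [hp, if_true, this]
        · simp [hp]
      rw [hfold g₁ (by omega), ih rest.length (by omega) rest rfl g₁ g₂ (by omega) (by omega)]

-- With enough fuel, pvAux never returns the empty list.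
theorem pvAux_ne_nil (its : List (String × String)) :
    ∀ (n : Nat) (cs : List Char), cs.length = n → ∀ (f : Nat), n < f →
      pvAux its f cs ≠ [] := by
  intro n
  induction n using Nat.strong_induction_on with
  | _ n ih =>
    intro cs hlen f hf
    obtain ⟨g, rfl⟩ : ∃ g, f = g + 1 := ⟨f - 1, by omega⟩
    cases cs with
    | nil => simp [pvAux]
    | cons c rest =>
      rw [pvAux_succ_cons]
      split_ifs with hnil
      · have : pvAux its g rest ≠ [] :=
          ih rest.length (by simp at hlen; omega) rest rfl g (by simp at hlen; omega)
        simpa using this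
      · exact hnil

-- 'if p then acc ++ g x else acc' folds collect a flatMap.
theorem foldl_if_append {α β : Type} (l : List α) (p : α → Bool) (g : α → List β)
    (acc : List β) :
    l.foldl (fun acc x => if p x then acc ++ g x else acc) acc
      = acc ++ l.flatMap (fun x => if p x then g x else []) := by
  induction l generalizing acc with
  | nil => simp
  | cons x l ih => by_cases hp : p x = true <;> simp [ih, hp]

-- A flatMap over a filterMap is one flatMap through the option.
theorem flatMap_filterMap {α β γ : Type} (l : List α) (g : α → Option β) (F : β → List γ) :
    (l.filterMap g).flatMap F = l.flatMap (fun x => ((g x).map F).getD []) := by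
  induction l with
  | nil => simp
  | cons x l ih => cases hg : g x <;> simp [hg, ih]

-- The table built by B holds A's value for every suffix.
theorem compose_opts_eq (its : List (String × String))
    (hk : ∀ kv ∈ its, kv.1.toList ≠ ([] : List Char)) (cs : List Char) :
    pvCompose (pvOpts its cs) = cs.tails.map (fun s => pvAux its (s.length + 1) s) := by
  induction cs with
  | nil => simp [pvOpts, pvCompose, pvAux]
  | cons c rest ih =>
    simp only [pvOpts, pvCompose, ih, List.tails_cons, List.map_cons]
    congr 1
    -- the head entry: B's composition of the options equals A's recursion step
    have hget : ∀ i, i ≤ rest.length →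
        ((rest.tails.map (fun s => pvAux its (s.length + 1) s)).getD i [])
          = pvAux its ((rest.drop i).length + 1) (rest.drop i) := by
      intro i hi
      rw [List.getD_eq_getElem _ _
        (by simp only [List.length_map, List.length_tails]; omega)]
      simp [List.getElem_tails]
    rw [pvAux_succ_cons]
    rw [foldl_if_append, List.nil_append]
    simp only [List.length_cons]
    set P := fun kv : String × String => kv.1.toList.isPrefixOf (c :: rest) with hP
    by_cases ho : its.filterMap (fun kv =>
        if kv.1.toList.isPrefixOf (c :: rest) then
          some (kv.1.toList.length, kv.2.toList) else none) = []
    · -- no key matches: both sides take the literal-character fallback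
      have hnone := List.filterMap_eq_nil_iff.mp ho
      have hall : ∀ kv ∈ its, kv.1.toList.isPrefixOf (c :: rest) = false := by
        intro kv hkv
        have := hnone kv hkv
        by_cases h : kv.1.toList.isPrefixOf (c :: rest) = true
        · simp [h] at this
        · exact Bool.eq_false_iff.mpr h
      have hfold : its.flatMap (fun kv =>
          if kv.1.toList.isPrefixOf (c :: rest) then
            (pvAux its (rest.length + 1) ((c :: rest).drop kv.1.toList.length)).map
              (fun r => kv.2.toList ++ r)
          else []) = [] := by
        apply List.flatMap_eq_nil_iff.mpr
        intro kv hkv; simp [hall kv hkv]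
      rw [ho, hfold, if_pos rfl]
      simp only [List.flatMap_cons, List.flatMap_nil, List.append_nil]
      rw [hget 0 (Nat.zero_le _)]
      simp
    · -- some key matches: both sides are the same flatMap over the matching keys
      rw [if_neg ho, flatMap_filterMap]
      have hne : its.flatMap (fun kv =>
          if kv.1.toList.isPrefixOf (c :: rest) then
            (pvAux its (rest.length + 1) ((c :: rest).drop kv.1.toList.length)).map
              (fun r => kv.2.toList ++ r)
          else []) ≠ [] := by
        intro hnil
        apply ho
        apply List.filterMap_eq_nil_iff.mpr
        intro kv hkv
        have hterm := List.flatMap_eq_nil_iff.mp hnil kv hkv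
        by_cases hp : kv.1.toList.isPrefixOf (c :: rest) = true
        · exfalso
          have hpre := List.isPrefixOf_iff_prefix.mp hp
          have hle : kv.1.toList.length ≤ rest.length + 1 := by
            simpa using hpre.length_le
          have hpos : 1 ≤ kv.1.toList.length := List.length_pos_of_ne_nil (hk kv hkv)
          have hA : pvAux its (rest.length + 1) ((c :: rest).drop kv.1.toList.length) ≠ [] := by
            apply pvAux_ne_nil its _ _ rfl
            simp only [List.length_drop, List.length_cons]; omega
          rw [if_pos hp] at hterm
          exact hA (List.map_eq_nil_iff.mp hterm)
        · simp [hp]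
      rw [if_neg hne]
      have : ∀ kv ∈ its,
          (((if kv.1.toList.isPrefixOf (c :: rest) then
              some (kv.1.toList.length, kv.2.toList) else none).map
            (fun lv : Nat × List Char =>
              ((rest.tails.map (fun s => pvAux its (s.length + 1) s)).getD (lv.1 - 1) []).map
                (fun r => lv.2 ++ r))).getD [])
          = (if kv.1.toList.isPrefixOf (c :: rest) then
              (pvAux its (rest.length + 1) ((c :: rest).drop kv.1.toList.length)).map
                (fun r => kv.2.toList ++ r)
            else []) := by
        intro kv hkv
        by_cases hp : kv.1.toList.isPrefixOf (c :: rest) = true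
        · have hpre := List.isPrefixOf_iff_prefix.mp hp
          have hle : kv.1.toList.length ≤ rest.length + 1 := by
            simpa using hpre.length_le
          have hpos : 1 ≤ kv.1.toList.length := List.length_pos_of_ne_nil (hk kv hkv)
          rw [if_pos hp, if_pos hp]
          simp only [Option.map_some, Option.getD_some]
          rw [hget (kv.1.toList.length - 1) (by omega)]
          have hdrop : rest.drop (kv.1.toList.length - 1)
              = (c :: rest).drop kv.1.toList.length := by
            obtain ⟨m, hm⟩ : ∃ m, kv.1.toList.length = m + 1 := ⟨_, (Nat.succ_pred_eq_of_pos hpos).symm⟩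
            simp [hm]
          rw [hdrop]
          congr 1
          apply pvAux_fuel its hk _ _ rfl
          · omega
          · simp only [List.length_drop, List.length_cons]; omega
        · simp [hp]
      calc its.flatMap _ = its.flatMap _ := List.flatMap_congr this

-- ===== VERDICT (by name: the statement is the Claim_ definition above) =====
theorem leet_to_normal_spec : Claim_equal_leet_to_normal := by
  intro text dict hdom hpre
  unfold Spec_leet_to_normal leet_to_normal leet_to_normal_alt
  rcases hpre with h | hk
  · subst h; rfl
  · have hk' : ∀ kv ∈ (PySem.Dict.ofList dict).items, kv.1.toList ≠ ([] : List Char) := by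
      intro kv hkv h0
      have hkey : kv.1 ∈ (PySem.Dict.ofList dict).keys :=
        List.mem_map_of_mem hkv
      have hkeys : (PySem.Dict.ofList dict).keys
          = PySem.Set.update (PySem.Dict.empty.keys) (dict.map Prod.fst) :=
        PySem.Dict.keys_foldl_insert_key dict Prod.fst (fun _ p => p.2) PySem.Dict.empty
      rw [hkeys] at hkey
      have : kv.1 ∈ dict.map Prod.fst := by
        rcases (PySem.Set.mem_update _ _ _).mp hkey with h | h
        · simp [PySem.Dict.keys_empty] at h
        · exact h
      rcases List.mem_map.mp this with ⟨p, hp, hfst⟩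
      have hempty : kv.1 = "" := by
        have := congrArg String.ofList h0
        simpa using this
      exact hk p hp (hfst.trans hempty)
    rw [compose_opts_eq _ hk']
    cases hcs : text.toList with
    | nil => rfl
    | cons c rest => simp
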